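-- pv_equiv track=rewrite | github.com/feel0321/feel_baekjoon | pythoncode/대회1_폰호석만.py | check
-- ===== SOURCE A (Python) =====
-- def check(a_dict, b_dict):
--     answer = []
--     for item in a_dict.items():
--         for item2 in b_dict.items():
--             if item[0] == item2[0]:
--                 continue
--             if item[1] == item2[1]:
--                 answer.append((item, item2[0]))
--         if len(answer) > 1:
--             return answer
--     return answer
-- ===== SOURCE B (Python) =====
-- def check(a_dict, b_dict):
--     by_val = {}
--     for k2, v2 in b_dict.items():
--         by_val.setdefault(v2, []).append(k2)
--     answer = []
--     for k, v in a_dict.items():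
--         answer += [((k, v), k2) for k2 in by_val.get(v, []) if k2 != k]
--         if len(answer) > 1:
--             return answer
--     return answer
-- ===== Notes on version B (the rewrite author's own statement) =====
-- stated objective: alternative
-- what changed: B builds a value->keys index of b_dict once and looks each a-item's value up in it, replacing A's inner scan of b_dict per a-item; A's early return after two matches makes both effectively linear in practice, so no speed is claimed.
import Mathlib
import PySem

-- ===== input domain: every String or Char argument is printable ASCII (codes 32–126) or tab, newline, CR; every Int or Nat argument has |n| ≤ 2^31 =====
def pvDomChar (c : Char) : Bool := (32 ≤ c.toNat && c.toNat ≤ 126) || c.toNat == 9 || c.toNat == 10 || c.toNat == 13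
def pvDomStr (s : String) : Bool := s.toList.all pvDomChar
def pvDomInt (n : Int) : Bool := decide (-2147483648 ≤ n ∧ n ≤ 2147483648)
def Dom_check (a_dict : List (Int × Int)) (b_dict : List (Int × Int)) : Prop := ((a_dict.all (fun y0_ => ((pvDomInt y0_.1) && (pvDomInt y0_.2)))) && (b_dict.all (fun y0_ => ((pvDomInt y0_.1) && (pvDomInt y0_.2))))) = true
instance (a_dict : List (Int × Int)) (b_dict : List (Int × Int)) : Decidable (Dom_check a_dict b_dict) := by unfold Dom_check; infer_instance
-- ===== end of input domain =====

-- B replaces A's inner scan of b_dict per a-item by a value→keys index of b_dict built once (objective: alternative algorithm).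


-- ===== PORT A =====
-- inner 'for item2 in b_dict.items()' loop appending matches to answer
def checkInner (item : Int × Int) (b_dict : List (Int × Int)) (ans : List ((Int × Int) × Int)) : List ((Int × Int) × Int) :=
  b_dict.foldl (fun ans item2 =>
    if item.1 = item2.1 then ans
    else if item.2 = item2.2 then ans ++ [(item, item2.1)]
    else ans) ans

-- outer 'for item in a_dict.items()' loop with the early 'return answer' when len(answer) > 1
def checkLoop (b_dict : List (Int × Int)) : List (Int × Int) → List ((Int × Int) × Int) → List ((Int × Int) × Int)
  | [], ans => ans
  | item :: rest, ans =>
    let ans' := checkInner item b_dict ans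
    if 1 < ans'.length then ans' else checkLoop b_dict rest ans'

def check (a_dict : List (Int × Int)) (b_dict : List (Int × Int)) : List ((Int × Int) × Int) :=
  checkLoop b_dict a_dict []

-- ===== PORT B =====
-- by_val: value → list of b-keys with that value, b_dict's insertion order (setdefault(v,[]).append(k))
def buildIndex (b_dict : List (Int × Int)) : PySem.Dict Int (List Int) :=
  b_dict.foldl (fun d p => d.modify p.2 [] (· ++ [p.1])) PySem.Dict.empty

def altLoop (d : PySem.Dict Int (List Int)) : List (Int × Int) → List ((Int × Int) × Int) → List ((Int × Int) × Int)
  | [], ans => ans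
  | (k, v) :: rest, ans =>
    let ans' := ans ++ (((d.getD v []).filter (fun k2 => k2 ≠ k)).map (fun k2 => ((k, v), k2)))
    if 1 < ans'.length then ans' else altLoop d rest ans'

def check_alt (a_dict : List (Int × Int)) (b_dict : List (Int × Int)) : List ((Int × Int) × Int) :=
  altLoop (buildIndex b_dict) a_dict []

-- ===== PRECONDITION & SPEC =====
def Spec_check (a_dict : List (Int × Int)) (b_dict : List (Int × Int)) (out : List ((Int × Int) × Int)) : Prop := out = check_alt a_dict b_dict
instance (a_dict : List (Int × Int)) (b_dict : List (Int × Int)) (out : List ((Int × Int) × Int)) : Decidable (Spec_check a_dict b_dict out) := by unfold Spec_check; infer_instance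

-- ===== CLAIM (what is proved, stated in full; the proofs are below) =====
def Claim_equal_check : Prop := ∀ (a_dict : List (Int × Int)) (b_dict : List (Int × Int)), Dom_check a_dict b_dict → Spec_check a_dict b_dict (check a_dict b_dict)

-- ===== LEMMAS AND PROOFS =====

-- the index lookup at v lists the keys of b-items whose value is v, in order
lemma buildIndex_getD (b : List (Int × Int)) : ∀ (d : PySem.Dict Int (List Int)) (v : Int),
    (b.foldl (fun d p => d.modify p.2 [] (· ++ [p.1])) d).getD v []
      = d.getD v [] ++ (b.filter (fun p => p.2 = v)).map (·.1) := by
  induction b with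
  | nil => intro d v; simp
  | cons p b ih =>
    intro d v
    simp only [List.foldl_cons, ih, List.filter_cons]
    by_cases h : p.2 = v
    · subst h
      simp [PySem.Dict.getD_modify_self]
    · simp [PySem.Dict.getD_modify_of_ne _ _ _ (fun hvp => h hvp.symm), h]

-- A's inner loop appends exactly the matching b-items, in order
lemma checkInner_char (item : Int × Int) : ∀ (b : List (Int × Int)) (ans : List ((Int × Int) × Int)),
    checkInner item b ans
      = ans ++ (b.filter (fun p => item.1 ≠ p.1 ∧ item.2 = p.2)).map (fun p => (item, p.1)) := by
  intro b
  induction b with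
  | nil => intro ans; simp [checkInner]
  | cons p b ih =>
    intro ans
    by_cases h1 : item.1 = p.1
    · rw [checkInner, List.foldl_cons, if_pos h1]
      rw [show ∀ a, List.foldl (fun ans item2 => if item.1 = item2.1 then ans else if item.2 = item2.2 then ans ++ [(item, item2.1)] else ans) a b = checkInner item b a from fun _ => rfl, ih]
      simp [h1]
    · by_cases h2 : item.2 = p.2
      · rw [checkInner, List.foldl_cons, if_neg h1, if_pos h2]
        rw [show ∀ a, List.foldl (fun ans item2 => if item.1 = item2.1 then ans else if item.2 = item2.2 then ans ++ [(item, item2.1)] else ans) a b = checkInner item b a from fun _ => rfl, ih]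
        simp [h1, h2]
      · rw [checkInner, List.foldl_cons, if_neg h1, if_neg h2]
        rw [show ∀ a, List.foldl (fun ans item2 => if item.1 = item2.1 then ans else if item.2 = item2.2 then ans ++ [(item, item2.1)] else ans) a b = checkInner item b a from fun _ => rfl, ih]
        simp [h1, h2]

-- filtering the mapped keys by k2 ≠ k is filtering the b-items by both conditions
lemma filtmap (k v : Int) : ∀ (l : List (Int × Int)),
    (((l.filter (fun p => p.2 = v)).map (·.1)).filter (fun k2 => k2 ≠ k)).map (fun k2 => (((k, v) : Int × Int), k2))
      = (l.filter (fun p => k ≠ p.1 ∧ v = p.2)).map (fun p => (((k, v) : Int × Int), p.1)) := by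
  intro l
  induction l with
  | nil => simp
  | cons p l ih =>
    by_cases h2 : p.2 = v
    · by_cases h1 : p.1 = k
      · simp only [List.filter_cons]
        simp [h2, h1]
        simpa using ih
      · simp only [List.filter_cons]
        simp [h2, h1, Ne.symm h1]
        simpa using ih
    · simp only [List.filter_cons]
      simp [h2, Ne.symm h2]
      simpa using ih

-- B's per-item contribution (index lookup, filtered) is the same list
lemma contrib_eq (b : List (Int × Int)) (k v : Int) :
    (((buildIndex b).getD v []).filter (fun k2 => k2 ≠ k)).map (fun k2 => (((k, v) : Int × Int), k2))
      = (b.filter (fun p => k ≠ p.1 ∧ v = p.2)).map (fun p => (((k, v) : Int × Int), p.1)) := by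
  have hidx : (buildIndex b).getD v [] = (b.filter (fun p => p.2 = v)).map (·.1) := by
    rw [buildIndex, buildIndex_getD]
    rfl
  rw [hidx, filtmap]

lemma loop_eq (b : List (Int × Int)) : ∀ (a : List (Int × Int)) (ans : List ((Int × Int) × Int)),
    checkLoop b a ans = altLoop (buildIndex b) a ans := by
  intro a
  induction a with
  | nil => intro ans; rfl
  | cons item rest ih =>
    intro ans
    obtain ⟨k, v⟩ := item
    simp only [checkLoop, altLoop, checkInner_char, contrib_eq]
    split_ifs with h <;> simp [ih]

-- ===== VERDICT (by name: the statement is the Claim_ definition above) =====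
theorem check_spec : Claim_equal_check := by
  intro a b _
  unfold Spec_check check check_alt
  exact loop_eq b a []
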